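-- pv_equiv track=rewrite | github.com/SpaceMercury/clustering-healthcare | clusters.py | preptype
-- ===== SOURCE A (Python) =====
-- def preptype(typ): # categorizes location type
--     translation = {(10, 11, 12, 13, 19) : "Industrial - L",
--                    (20, 21, 22, 23, 24, 25, 26, 29) : "Construction - L",
--                    (30, 31, 32, 33, 34, 35, 36, 39) : "Agricultural - L",
--                    (40, 41, 42, 43, 44, 49) : "Commercial - L",
--                    (50, 51, 59) : "Clinical - L",
--                    (60, 61, 62, 69, 93, 101, 110, 111, 112, 119) : "Transportation - L",
--                    (63,) : "Transportation, authorized personnel only - L",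
--                    (70, 71, 72, 79) : "Residential - L",
--                    (80, 81, 82, 89) : "Sporting facility - L",
--                    (90, 91, 92, 99) : "In the air - L",
--                    (100, 102, 103, 109) : "Underground - L",
--                    (120, 121, 122, 129) : "Underwater - L",
--                    (0, 999) : "Little/no information - L"}
--     for codes in translation:
--         if typ in codes:
--             return translation[codes]
--     raise Exception()
-- ===== SOURCE B (Python) =====
-- def preptype(typ):  # categorizes location type
--     # Arithmetic decomposition: split the code into tens and units digits and
--     # decide the category from the tens digit; the few codes that do not follow
--     # the digit pattern (0, 999, 63, 93, 101) are handled up front.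
--     if typ == 0 or typ == 999:
--         return "Little/no information - L"
--     if typ == 63:
--         return "Transportation, authorized personnel only - L"
--     if typ == 93 or typ == 101:
--         return "Transportation - L"
--     tens, units = divmod(typ, 10)
--     names = {1: "Industrial", 2: "Construction", 3: "Agricultural",
--              4: "Commercial", 5: "Clinical", 6: "Transportation",
--              7: "Residential", 8: "Sporting facility", 9: "In the air",
--              10: "Underground", 11: "Transportation", 12: "Underwater"}
--     max_units = {1: 3, 2: 6, 3: 6, 4: 4, 5: 1, 6: 2,
--                  7: 2, 8: 2, 9: 2, 10: 3, 11: 2, 12: 2}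
--     if tens in names and (units <= max_units[tens] or units == 9):
--         return names[tens] + " - L"
--     raise Exception()
-- ===== Notes on version B (the rewrite author's own statement) =====
-- stated objective: alternative
-- what changed: Replaces the scan over tuple-keyed groups by an arithmetic decomposition: five irregular codes (0, 999, 63, 93, 101) are handled up front, then divmod(typ, 10) splits the code into digits and the tens digit picks the category while the units digit is validated against a per-category maximum (or 9).
import Mathlib
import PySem

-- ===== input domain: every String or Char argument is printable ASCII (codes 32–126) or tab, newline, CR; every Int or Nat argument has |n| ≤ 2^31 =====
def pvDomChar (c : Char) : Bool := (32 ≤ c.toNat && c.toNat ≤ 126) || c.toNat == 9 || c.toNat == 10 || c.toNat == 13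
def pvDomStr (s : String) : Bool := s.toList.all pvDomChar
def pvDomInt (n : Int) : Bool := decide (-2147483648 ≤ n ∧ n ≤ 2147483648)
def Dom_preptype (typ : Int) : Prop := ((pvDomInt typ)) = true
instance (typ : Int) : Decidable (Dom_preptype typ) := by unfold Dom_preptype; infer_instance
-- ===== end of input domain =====

-- B replaces A's scan over tuple-keyed groups by an arithmetic tens/units-digit decomposition (objective: alternative).

-- ===== PORT A =====
-- A's dict with tuple keys, in insertion order.
def preptypeTranslation : List (List Int × String) :=
  [([10, 11, 12, 13, 19], "Industrial - L"),
   ([20, 21, 22, 23, 24, 25, 26, 29], "Construction - L"),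
   ([30, 31, 32, 33, 34, 35, 36, 39], "Agricultural - L"),
   ([40, 41, 42, 43, 44, 49], "Commercial - L"),
   ([50, 51, 59], "Clinical - L"),
   ([60, 61, 62, 69, 93, 101, 110, 111, 112, 119], "Transportation - L"),
   ([63], "Transportation, authorized personnel only - L"),
   ([70, 71, 72, 79], "Residential - L"),
   ([80, 81, 82, 89], "Sporting facility - L"),
   ([90, 91, 92, 99], "In the air - L"),
   ([100, 102, 103, 109], "Underground - L"),
   ([120, 121, 122, 129], "Underwater - L"),
   ([0, 999], "Little/no information - L")]

-- the 'for codes in translation: if typ in codes: return …' loop; "" marks the 'raise Exception()' fall-through (excluded by Pre_).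
def preptypeScan (typ : Int) : List (List Int × String) → String
  | [] => ""
  | (codes, label) :: rest => if typ ∈ codes then label else preptypeScan typ rest

def preptype (typ : Int) : String := preptypeScan typ preptypeTranslation

-- ===== PORT B =====
-- B's per-tens category names and largest consecutive units digit.
def preptypeNames : PySem.Dict Int String :=
  PySem.Dict.ofList
    [(1, "Industrial"), (2, "Construction"), (3, "Agricultural"),
     (4, "Commercial"), (5, "Clinical"), (6, "Transportation"),
     (7, "Residential"), (8, "Sporting facility"), (9, "In the air"),
     (10, "Underground"), (11, "Transportation"), (12, "Underwater")]

def preptypeMaxUnits : PySem.Dict Int Int :=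
  PySem.Dict.ofList
    [(1, 3), (2, 6), (3, 6), (4, 4), (5, 1), (6, 2),
     (7, 2), (8, 2), (9, 2), (10, 3), (11, 2), (12, 2)]

-- special cases first, then tens, units = divmod(typ, 10) and the digit test; "" marks 'raise Exception()' (excluded by Pre_).
def preptype_alt (typ : Int) : String :=
  if typ == 0 || typ == 999 then "Little/no information - L"
  else if typ == 63 then "Transportation, authorized personnel only - L"
  else if typ == 93 || typ == 101 then "Transportation - L"
  else
    let tens := PySem.Int.floordiv typ 10
    let units := PySem.Int.mod typ 10
    match preptypeNames.get? tens with
    | some name => if units ≤ preptypeMaxUnits.getD tens 0 || units == 9 then name ++ " - L" else ""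
    | none => ""

-- ===== PRECONDITION & SPEC =====
-- Pre_ excludes exactly the codes outside the table, on which A (and B) raise a bare Exception.
def Pre_preptype (typ : Int) : Prop :=
  typ ∈ (preptypeTranslation.flatMap Prod.fst)
instance (typ : Int) : Decidable (Pre_preptype typ) := by unfold Pre_preptype; infer_instance
def pvWitness_preptype : Int := 63

def Spec_preptype (typ : Int) (out : String) : Prop := out = preptype_alt typ
instance (typ : Int) (out : String) : Decidable (Spec_preptype typ out) := by unfold Spec_preptype; infer_instance

-- ===== CLAIM (what is proved, stated in full; the proofs are below) =====
def Claim_equal_preptype : Prop := ∀ (typ : Int), Dom_preptype typ → Pre_preptype typ → Spec_preptype typ (preptype typ)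

-- ===== LEMMAS AND PROOFS =====
set_option maxRecDepth 8000 in
theorem preptype_eq_on_codes :
    ∀ t ∈ (preptypeTranslation.flatMap Prod.fst), preptype t = preptype_alt t := by decide

-- ===== VERDICT (by name: the statement is the Claim_ definition above) =====
theorem preptype_spec : Claim_equal_preptype := by
  intro typ _ hpre
  exact preptype_eq_on_codes typ hpre
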